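-- pv_equiv track=rewrite | github.com/matias-casal/StreamScalePy | src/optimizations/final_optimizations.py | peephole_optimized_iterator
-- ===== SOURCE A (Python) =====
-- def peephole_optimized_iterator(num_items: int) -> int:
--     """
--     Iterator with peephole optimization.
--     Iterador con optimización peephole.
--     """
--     # Pre-compute constants (peephole optimization)
--     BATCH_SIZE = 1000  # Constant folding
--     MULTIPLIER = 2     # Constant folding
--
--     # Use iterator protocol for efficiency
--     count = 0
--     # Skip odd numbers directly using step
--     for i in range(0, min(num_items, BATCH_SIZE * 2), 2):
--         # Constant expression is pre-computed
--         _ = i * MULTIPLIER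
--         count += 1
--
--     return count
-- ===== SOURCE B (Python) =====
-- def peephole_optimized_iterator(num_items: int) -> int:
--     """Closed form: number of elements of range(0, min(num_items, 2000), 2)."""
--     return len(range(0, min(num_items, 2000), 2))
-- ===== Notes on version B (the rewrite author's own statement) =====
-- stated objective: simpler
-- what changed: Replaced the counting loop (with its dead constant-folding assignments) by the closed form len(range(0, min(num_items, 2000), 2)).
import Mathlib
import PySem

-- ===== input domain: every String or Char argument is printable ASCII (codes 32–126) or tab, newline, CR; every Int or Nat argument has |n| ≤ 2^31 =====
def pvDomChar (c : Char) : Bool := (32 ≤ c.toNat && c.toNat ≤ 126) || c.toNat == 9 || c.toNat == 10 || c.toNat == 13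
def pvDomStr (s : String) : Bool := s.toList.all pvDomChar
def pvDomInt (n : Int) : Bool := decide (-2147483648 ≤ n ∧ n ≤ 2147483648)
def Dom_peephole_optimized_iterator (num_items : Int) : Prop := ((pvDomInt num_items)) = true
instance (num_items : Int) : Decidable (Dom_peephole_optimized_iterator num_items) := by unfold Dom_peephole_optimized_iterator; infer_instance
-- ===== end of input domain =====

-- ===== PORT A =====
-- B replaces A's counting loop by the closed form len(range(0, min(n,2000), 2)); objective: simpler (O(1)).
def peephole_optimized_iterator (num_items : Int) : Int :=
  -- BATCH_SIZE = 1000, MULTIPLIER = 2; count = 0; for i in range(0, min(num_items, BATCH_SIZE*2), 2): _ = i*MULTIPLIER; count += 1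
  (PySem.List.pyRange 0 (min num_items (1000 * 2)) 2).foldl
    (fun count i => let _ := i * 2; count + 1) 0

-- ===== PORT B =====
-- len(range(0, min(num_items, 2000), 2)) : Python computes this length in closed form
def peephole_optimized_iterator_alt (num_items : Int) : Int :=
  ((PySem.List.pyRange 0 (min num_items 2000) 2).length : Int)

-- ===== PRECONDITION & SPEC =====
def Spec_peephole_optimized_iterator (num_items : Int) (out : Int) : Prop := out = peephole_optimized_iterator_alt num_items
instance (num_items : Int) (out : Int) : Decidable (Spec_peephole_optimized_iterator num_items out) := by unfold Spec_peephole_optimized_iterator; infer_instance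

-- ===== CLAIM (what is proved, stated in full; the proofs are below) =====
def Claim_equal_peephole_optimized_iterator : Prop := ∀ (num_items : Int), Dom_peephole_optimized_iterator num_items → Spec_peephole_optimized_iterator num_items (peephole_optimized_iterator num_items)

-- ===== LEMMAS AND PROOFS =====
-- folding (+1) over any list counts its length
theorem foldl_count_eq_length (l : List Int) (c : Int) :
    l.foldl (fun count i => let _ := i * 2; count + 1) c = c + (l.length : Int) := by
  induction l generalizing c with
  | nil => simp
  | cons x xs ih => simp [List.foldl, ih]; ring

-- ===== VERDICT (by name: the statement is the Claim_ definition above) =====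
theorem peephole_optimized_iterator_spec : Claim_equal_peephole_optimized_iterator := by
  intro n _
  unfold Spec_peephole_optimized_iterator peephole_optimized_iterator peephole_optimized_iterator_alt
  rw [foldl_count_eq_length]
  norm_num
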